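-- pv_equiv track=rewrite | github.com/ainaju618-blip/koreanewskorea | backupscrapers/utils/adaptive_scheduler.py | _get_current_schedule
-- ===== SOURCE A (Python) =====
-- from typing import Dict, List, Optional, Set, Tuple
--
-- TIME_SCHEDULES: List[Tuple[int, int, int]] = [
--     (9, 18, 30),    # 09:00 ~ 18:00: 30 min interval (business hours)
--     (18, 23, 120),  # 18:00 ~ 23:00: 2 hour interval (evening)
--     (23, 7, 0),     # 23:00 ~ 07:00: STOP (night - no monitoring)
--     (7, 9, 60),     # 07:00 ~ 09:00: 1 hour interval (early morning)
-- ]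
--
-- def _get_current_schedule(hour: int) -> Tuple[int, str]:
--     """
--     Get the current interval based on hour.
--
--     Returns:
--         (interval_minutes, reason_description)
--         interval_minutes = 0 means STOP (no monitoring)
--     """
--     for start_h, end_h, interval in TIME_SCHEDULES:
--         # Handle overnight ranges (e.g., 23 to 7)
--         if start_h > end_h:
--             # Overnight: e.g., 23-7 means 23,24(0),1,2,3,4,5,6
--             if hour >= start_h or hour < end_h:
--                 if interval == 0:
--                     return (0, "Night hours - no monitoring")
--                 return (interval, f"Night schedule ({start_h}:00~{end_h}:00)")
--         else:
--             # Normal range: e.g., 9-18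
--             if start_h <= hour < end_h:
--                 if interval == 0:
--                     return (0, "Scheduled stop")
--                 if start_h == 9 and end_h == 18:
--                     return (interval, "Business hours (30min interval)")
--                 elif start_h == 18:
--                     return (interval, "Evening (2hr interval)")
--                 elif start_h == 7:
--                     return (interval, "Early morning (1hr interval)")
--                 return (interval, f"Scheduled ({start_h}:00~{end_h}:00)")
--
--     # Default fallback (should not reach here if TIME_SCHEDULES covers 24h)
--     return (60, "Default schedule")
-- ===== SOURCE B (Python) =====
-- def _get_current_schedule(hour: int) -> tuple:
--     if 9 <= hour < 18:
--         return (30, "Business hours (30min interval)")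
--     if 18 <= hour < 23:
--         return (120, "Evening (2hr interval)")
--     if 7 <= hour < 9:
--         return (60, "Early morning (1hr interval)")
--     return (0, "Night hours - no monitoring")
-- ===== Notes on version B (the rewrite author's own statement) =====
-- stated objective: simpler
-- what changed: Replaced the loop over the TIME_SCHEDULES table with its overnight-wrap branch logic and f-string formatting by a direct four-way conditional cascade on hour with literal results.
import Mathlib
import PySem

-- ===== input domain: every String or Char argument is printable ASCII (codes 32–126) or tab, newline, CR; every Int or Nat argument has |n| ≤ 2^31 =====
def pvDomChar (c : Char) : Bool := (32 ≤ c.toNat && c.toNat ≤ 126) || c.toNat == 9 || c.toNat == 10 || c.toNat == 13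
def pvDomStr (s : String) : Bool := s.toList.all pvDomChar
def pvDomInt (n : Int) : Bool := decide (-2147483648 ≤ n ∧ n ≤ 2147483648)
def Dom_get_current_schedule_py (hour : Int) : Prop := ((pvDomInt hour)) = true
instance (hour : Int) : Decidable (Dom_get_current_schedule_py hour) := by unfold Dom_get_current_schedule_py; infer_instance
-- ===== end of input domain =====

-- B replaces A’s table loop and overnight-wrap logic by a direct conditional cascade on hour (objective: simpler).


-- ===== PORT A =====
-- TIME_SCHEDULES constant
def TIME_SCHEDULES : List (Int × Int × Int) :=
  [(9, 18, 30), (18, 23, 120), (23, 7, 0), (7, 9, 60)]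

-- the for-loop of A: first matching entry returns, else fall through
def schedLoop (hour : Int) : List (Int × Int × Int) → Int × String
  | [] => (60, "Default schedule")
  | (start_h, end_h, interval) :: rest =>
    if start_h > end_h then
      if hour ≥ start_h ∨ hour < end_h then
        if interval = 0 then (0, "Night hours - no monitoring")
        else (interval, "Night schedule (" ++ PySem.Int.toStr start_h ++ ":00~" ++ PySem.Int.toStr end_h ++ ":00)")
      else schedLoop hour rest
    else
      if start_h ≤ hour ∧ hour < end_h then
        if interval = 0 then (0, "Scheduled stop")
        else if start_h = 9 ∧ end_h = 18 then (interval, "Business hours (30min interval)")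
        else if start_h = 18 then (interval, "Evening (2hr interval)")
        else if start_h = 7 then (interval, "Early morning (1hr interval)")
        else (interval, "Scheduled (" ++ PySem.Int.toStr start_h ++ ":00~" ++ PySem.Int.toStr end_h ++ ":00)")
      else schedLoop hour rest

def get_current_schedule_py (hour : Int) : Int × String :=
  schedLoop hour TIME_SCHEDULES

-- ===== PORT B =====
def get_current_schedule_py_alt (hour : Int) : Int × String :=
  if 9 ≤ hour ∧ hour < 18 then (30, "Business hours (30min interval)")
  else if 18 ≤ hour ∧ hour < 23 then (120, "Evening (2hr interval)")
  else if 7 ≤ hour ∧ hour < 9 then (60, "Early morning (1hr interval)")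
  else (0, "Night hours - no monitoring")

-- ===== PRECONDITION & SPEC =====
def Spec_get_current_schedule_py (hour : Int) (out : Int × String) : Prop := out = get_current_schedule_py_alt hour
instance (hour : Int) (out : Int × String) : Decidable (Spec_get_current_schedule_py hour out) := by unfold Spec_get_current_schedule_py; infer_instance

-- ===== CLAIM (what is proved, stated in full; the proofs are below) =====
def Claim_equal_get_current_schedule_py : Prop := ∀ (hour : Int), Dom_get_current_schedule_py hour → Spec_get_current_schedule_py hour (get_current_schedule_py hour)

-- ===== LEMMAS AND PROOFS =====

-- ===== VERDICT (by name: the statement is the Claim_ definition above) =====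
theorem get_current_schedule_py_spec : Claim_equal_get_current_schedule_py := by
  intro hour _
  unfold Spec_get_current_schedule_py get_current_schedule_py get_current_schedule_py_alt TIME_SCHEDULES
  rw [schedLoop, schedLoop, schedLoop, schedLoop]
  norm_num only
  split_ifs <;> first | rfl | omega | tauto
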